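-- pv_equiv track=rewrite | github.com/bzinberg/playbx_progchal | matt.py | is_sorted_wrt
-- ===== SOURCE A (Python) =====
-- def is_sorted_wrt(text, char_order):
--   # Split apart char_order into a dictionary
--   # containing char:index where index is the
--   # 0-based index of the character in the
--   # string.
--   # NOTE: Because the char_order values in
--   # the unit tests are all short this is only
--   # slightly faster than calling
--   # char_order.find() directly.
--   order_dict = {}
--
--   ## Method 1: Zip + dict (0.71 for 10k)
--   # order_dict = dict(zip(
--   #     char_order, range(len(char_order))))
--
--   ## Method 2: Enumerate (0.50 for 10k)
--   # for num, char in enumerate(char_order):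
--   #   order_dict[char] = num
--
--   ## Method 3: While loop (0.45 for 10k)
--   num = 0
--   while num < len(char_order):
--     order_dict[char_order[num]] = num
--     num += 1
--
--   # Perform the method lookup once here
--   # instead of in each iteration of the loop.
--   lookup_order = order_dict.get
--
--   # Iterate through the text and make sure
--   # that the characters are in the expected
--   # order.
--   last_order = -1
--   for char in text:
--     order = lookup_order(char, -1)
--     if order != -1:
--       if order < last_order:
--         return False
--       last_order = order
--   return True
-- ===== SOURCE B (Python) =====
-- def is_sorted_wrt(text, char_order):
--   # Build the char -> index map (last occurrence wins, like repeated
--   # assignment in A's while loop).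
--   order_dict = {}
--   for num, char in enumerate(char_order):
--     order_dict[char] = num
--   # Materialize the sequence of ranks of the relevant characters and
--   # use the "compare with its sorted copy" idiom.
--   orders = [order_dict[c] for c in text if c in order_dict]
--   return orders == sorted(orders)
-- ===== Notes on version B (the rewrite author's own statement) =====
-- stated objective: idiomatic
-- what changed: Replaces A's single-pass running-max scan with early return by materializing the list of character ranks and comparing it to its sorted copy (orders == sorted(orders)).
import Mathlib
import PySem

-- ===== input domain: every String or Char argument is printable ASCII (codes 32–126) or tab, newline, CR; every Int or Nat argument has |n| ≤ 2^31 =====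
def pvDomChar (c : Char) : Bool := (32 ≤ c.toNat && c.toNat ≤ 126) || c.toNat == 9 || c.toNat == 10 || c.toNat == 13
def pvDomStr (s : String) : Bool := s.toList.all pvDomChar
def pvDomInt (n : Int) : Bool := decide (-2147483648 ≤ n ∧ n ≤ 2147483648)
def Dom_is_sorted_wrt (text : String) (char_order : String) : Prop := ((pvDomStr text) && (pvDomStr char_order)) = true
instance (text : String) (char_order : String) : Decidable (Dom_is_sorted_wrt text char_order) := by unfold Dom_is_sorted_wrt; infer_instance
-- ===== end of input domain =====

-- B replaces A's running-max scan with "list of ranks == its sorted copy" (idiomatic; return value only).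

-- ===== PORT A =====
-- while num < len(char_order): order_dict[char_order[num]] = num; num += 1
-- (num ranges over 0..len-1, so the pyGetD default ' ' is never used; exact)
def pvBuildA (cs : List Char) : PySem.Dict Char Int :=
  (PySem.List.pyRange 0 (PySem.List.len cs) 1).foldl
    (fun d num => d.insert (PySem.List.pyGetD cs num ' ') num) PySem.Dict.empty

-- the for-char loop with its early 'return False'
def pvLoopA (d : PySem.Dict Char Int) : List Char → Int → Bool
  | [], _ => true
  | c :: rest, last =>
    let order := d.getD c (-1)
    if order ≠ -1 then
      if order < last then false else pvLoopA d rest order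
    else pvLoopA d rest last

def is_sorted_wrt (text : String) (char_order : String) : Bool :=
  pvLoopA (pvBuildA char_order.toList) text.toList (-1)

-- ===== PORT B =====
-- for num, char in enumerate(char_order): order_dict[char] = num
def pvBuildB (cs : List Char) : PySem.Dict Char Int :=
  (PySem.List.enumerate cs 0).foldl (fun d p => d.insert p.2 p.1) PySem.Dict.empty

-- orders = [order_dict[c] for c in text if c in order_dict]; orders == sorted(orders)
def is_sorted_wrt_alt (text : String) (char_order : String) : Bool :=
  let d := pvBuildB char_order.toList
  let orders := text.toList.filterMap (fun c => d.get? c)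
  orders == PySem.List.sorted orders (fun x => x) false

-- ===== PRECONDITION & SPEC =====
def Spec_is_sorted_wrt (text : String) (char_order : String) (out : Bool) : Prop := out = is_sorted_wrt_alt text char_order
instance (text : String) (char_order : String) (out : Bool) : Decidable (Spec_is_sorted_wrt text char_order out) := by unfold Spec_is_sorted_wrt; infer_instance

-- ===== CLAIM (what is proved, stated in full; the proofs are below) =====
def Claim_equal_is_sorted_wrt : Prop := ∀ (text : String) (char_order : String), Dom_is_sorted_wrt text char_order → Spec_is_sorted_wrt text char_order (is_sorted_wrt text char_order)

-- ===== LEMMAS AND PROOFS =====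

-- the two dict-building loops produce the same dict
theorem pvBuildA_eq_pvBuildB (cs : List Char) : pvBuildA cs = pvBuildB cs := by
  unfold pvBuildA pvBuildB
  rw [PySem.List.enumerate_eq_map_pyRange cs ' ', List.foldl_map]

-- every value stored by B's build loop is a nonnegative index
theorem pvBuild_nonneg_aux (l : List (Int × Char)) (d : PySem.Dict Char Int)
    (hl : ∀ p ∈ l, 0 ≤ p.1) (hd : ∀ c v, d.get? c = some v → 0 ≤ v) :
    ∀ c v, (l.foldl (fun d p => d.insert p.2 p.1) d).get? c = some v → 0 ≤ v := by
  induction l generalizing d with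
  | nil => exact hd
  | cons p t ih =>
    refine ih _ (fun q hq => hl q (List.mem_cons_of_mem _ hq)) ?_
    intro c v hv
    by_cases hc : c = p.2
    · subst hc
      rw [PySem.Dict.get?_insert_self] at hv
      cases hv
      exact hl p (List.mem_cons_self)
    · rw [PySem.Dict.get?_insert_of_ne _ _ hc] at hv
      exact hd c v hv

theorem pvBuildB_nonneg (cs : List Char) :
    ∀ c v, (pvBuildB cs).get? c = some v → 0 ≤ v := by
  refine pvBuild_nonneg_aux _ _ (fun p hp => ?_) (fun c v hv => by simp [pysem] at hv)
  rcases (PySem.List.mem_enumerate_iff cs 0 p).1 hp with ⟨k, hk, rfl⟩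
  simp

-- abstract form of A's scanning loop
def pvNonDec : Int → List Int → Bool
  | _, [] => true
  | last, o :: os => if o < last then false else pvNonDec o os

theorem pvLoopA_eq_pvNonDec (d : PySem.Dict Char Int)
    (hd : ∀ c v, d.get? c = some v → 0 ≤ v) :
    ∀ (cs : List Char) (last : Int),
      pvLoopA d cs last = pvNonDec last (cs.filterMap (fun c => d.get? c)) := by
  intro cs
  induction cs with
  | nil => intro last; rfl
  | cons c rest ih =>
    intro last
    rw [pvLoopA, List.filterMap_cons]
    cases h : d.get? c with
    | none =>
      have hg : d.getD c (-1) = -1 := by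
        rw [PySem.Dict.getD_eq_get?_getD, h]; rfl
      simp only [hg]
      simpa using ih last
    | some v =>
      have hg : d.getD c (-1) = v := by
        rw [PySem.Dict.getD_eq_get?_getD, h]; rfl
      have hv : 0 ≤ v := hd c v h
      have hne : v ≠ -1 := by omega
      rw [hg, if_pos hne]
      simp only [pvNonDec, ih]

theorem pvNonDec_iff (os : List Int) :
    ∀ last, pvNonDec last os = true ↔ List.IsChain (· ≤ ·) (last :: os) := by
  induction os with
  | nil => intro last; simp [pvNonDec, List.IsChain.singleton last]
  | cons o t ih =>
    intro last
    rw [pvNonDec, List.isChain_cons_cons, ← ih o]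
    by_cases h : o < last
    · simp only [if_pos h]
      constructor
      · intro hf; cases hf
      · rintro ⟨hle, _⟩; omega
    · simp only [if_neg h]
      exact ⟨fun hc => ⟨by omega, hc⟩, fun ⟨_, hc⟩ => hc⟩

theorem sorted_self_iff_pairwise (os : List Int) :
    (os == PySem.List.sorted os (fun x => x)) = true ↔ os.Pairwise (· ≤ ·) := by
  rw [beq_iff_eq]
  constructor
  · intro he
    rw [he]
    exact PySem.List.sorted_pairwise os (fun x => x)
  · intro hp
    exact (PySem.List.sorted_eq_self_of_pairwise os (fun x => x) hp).symm

-- ===== VERDICT (by name: the statement is the Claim_ definition above) =====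
theorem is_sorted_wrt_spec : Claim_equal_is_sorted_wrt := by
  intro text char_order _
  unfold Spec_is_sorted_wrt is_sorted_wrt is_sorted_wrt_alt
  rw [pvBuildA_eq_pvBuildB]
  set d := pvBuildB char_order.toList with hdd
  have hd := pvBuildB_nonneg char_order.toList
  rw [pvLoopA_eq_pvNonDec d hd]
  set os := text.toList.filterMap (fun c => d.get? c) with hos
  have hnn : ∀ o ∈ os, 0 ≤ o := by
    intro o ho
    rcases List.mem_filterMap.1 ho with ⟨c, _, hc⟩
    exact hd c o hc
  rw [Bool.eq_iff_iff, pvNonDec_iff, sorted_self_iff_pairwise, List.isChain_cons,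
    List.isChain_iff_pairwise]
  constructor
  · rintro ⟨_, hc⟩; exact hc
  · intro hp
    refine ⟨fun y hy => ?_, hp⟩
    have := hnn y (List.mem_of_mem_head? hy); omega
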